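-- pv_equiv track=rewrite | github.com/monni1729/study | coding_test/가사 검색.py | next_chr
-- ===== SOURCE A (Python) =====
-- def next_chr(word):
--     if word == 'z' * len(word):
--         return chr(ord('z') + 1)
--     else:
--         temp = list(word)
--         for c_idx in range(len(word) - 1, -1, -1):
--             if word[c_idx] != 'z':
--                 temp[c_idx] = chr(ord(temp[c_idx]) + 1)
--                 break
--             else:
--                 temp.pop(c_idx)
--         rw = ''
--         for c in temp:
--             rw += c
--         return rw
-- ===== SOURCE B (Python) =====
-- def next_chr(word):
--     last = -1
--     for i, c in enumerate(word):
--         if c != 'z':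
--             last = i
--     if last < 0:
--         return chr(ord('z') + 1)
--     return word[:last] + chr(ord(word[last]) + 1)
-- ===== Notes on version B (the rewrite author's own statement) =====
-- stated objective: alternative
-- what changed: Instead of A's backward early-exit loop that pops trailing 'z's and mutates the list, B makes one forward scan recording the index of the last non-'z' character, then builds the result directly as word[:last] plus the incremented character (no stripping, no mutation).
import Mathlib
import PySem

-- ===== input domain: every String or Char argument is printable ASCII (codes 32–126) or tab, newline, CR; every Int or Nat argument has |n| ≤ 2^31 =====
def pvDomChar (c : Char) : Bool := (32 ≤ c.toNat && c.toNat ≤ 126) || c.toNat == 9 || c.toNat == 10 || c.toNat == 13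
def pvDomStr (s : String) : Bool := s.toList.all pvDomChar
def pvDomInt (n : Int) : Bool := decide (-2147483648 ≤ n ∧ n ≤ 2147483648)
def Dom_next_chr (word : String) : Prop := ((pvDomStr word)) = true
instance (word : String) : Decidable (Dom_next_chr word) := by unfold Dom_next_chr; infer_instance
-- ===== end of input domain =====

-- B replaces A's backward pop-and-increment loop with one forward scan recording the
-- last non-'z' index, then a single slice + increment (alternative decomposition).

-- ===== PORT A =====
-- the for-loop over range(len(word)-1, -1, -1): fuel i means the current index is i-1;
-- temp is the mutated list state (pop at the current index, or set-and-break)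
def next_chr_loop (word : List Char) : Nat → List Char → List Char
  | 0, temp => temp
  | i + 1, temp =>
      if word.getD i ' ' ≠ 'z' then
        temp.set i (Char.ofNat ((temp.getD i ' ').toNat + 1))
      else
        next_chr_loop word i (temp.take i ++ temp.drop (i + 1))

def next_chr (word : String) : String :=
  if word == String.ofList (List.replicate word.toList.length 'z') then
    String.ofList [Char.ofNat ('z'.toNat + 1)]
  else
    let temp := next_chr_loop word.toList word.toList.length word.toList
    temp.foldl (fun s c => s.push c) ""

-- ===== PORT B =====
-- forward loop 'for i, c in enumerate(word): if c != 'z': last = i', then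
-- word[:last] (last ≥ 0 ≤ len here, so it is List.take) plus the incremented char at last
def next_chr_alt (word : String) : String :=
  let last : Int := (PySem.List.enumerate word.toList).foldl
      (fun acc p => if p.2 ≠ 'z' then p.1 else acc) (-1)
  if last < 0 then String.ofList [Char.ofNat ('z'.toNat + 1)]
  else String.ofList (word.toList.take last.toNat ++
        [Char.ofNat ((word.toList.getD last.toNat ' ').toNat + 1)])

-- ===== PRECONDITION & SPEC =====
def Spec_next_chr (word : String) (out : String) : Prop := out = next_chr_alt word
instance (word : String) (out : String) : Decidable (Spec_next_chr word out) := by unfold Spec_next_chr; infer_instance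

-- ===== CLAIM (what is proved, stated in full; the proofs are below) =====
def Claim_equal_next_chr : Prop := ∀ (word : String), Dom_next_chr word → Spec_next_chr word (next_chr word)

-- ===== LEMMAS AND PROOFS =====

-- common intermediate form: on the REVERSED character list, skip leading 'z's and
-- increment the first non-'z'
def stripInc : List Char → List Char
  | [] => []
  | c :: rest => if c = 'z' then stripInc rest else Char.ofNat (c.toNat + 1) :: rest

lemma stripInc_dropWhile (R : List Char) :
    stripInc R = match R.dropWhile (fun c => c == 'z') with
      | [] => []
      | c :: rest => Char.ofNat (c.toNat + 1) :: rest := by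
  induction R with
  | nil => simp [stripInc]
  | cons c rest ih =>
      by_cases h : c = 'z'
      · simp [stripInc, h, ih]
      · simp [stripInc, h]

-- ---- A side ----
lemma loop_eq_stripInc (l : List Char) :
    ∀ i, i ≤ l.length →
      next_chr_loop l i (l.take i) = (stripInc (l.take i).reverse).reverse := by
  intro i
  induction i with
  | zero => intro _; simp [next_chr_loop, stripInc]
  | succ i ih =>
      intro hle
      have hi : i < l.length := by omega
      have htake : l.take (i + 1) = l.take i ++ [l[i]] := by
        rw [List.take_add_one]
        rw [List.getElem?_eq_getElem hi]
        rfl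
      have hrev : (l.take (i + 1)).reverse = l[i] :: (l.take i).reverse := by
        rw [htake]; simp
      have hgetD : l.getD i ' ' = l[i] := List.getD_eq_getElem l ' ' hi
      by_cases hz : l[i] = 'z'
      · have hpop : (l.take (i + 1)).take i ++ (l.take (i + 1)).drop (i + 1) = l.take i := by
          have h1 : (l.take (i + 1)).take i = l.take i := by
            rw [List.take_take]; congr 1; omega
          have h2 : (l.take (i + 1)).drop (i + 1) = [] := by
            apply List.drop_eq_nil_of_le
            simp [List.length_take]
          rw [h1, h2, List.append_nil]
        simp only [next_chr_loop, hgetD, hz, ne_eq, not_true_eq_false, if_false, hpop, hrev,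
          stripInc, if_true]
        exact ih (le_of_lt hi)
      · have hlen : i < (l.take (i + 1)).length := by
          simp [List.length_take]; omega
        have hg : (l.take (i + 1)).getD i ' ' = l[i] := by
          rw [List.getD_eq_getElem _ _ hlen]
          simp
        have hset : (l.take (i + 1)).set i (Char.ofNat (((l.take (i + 1)).getD i ' ').toNat + 1))
            = l.take i ++ [Char.ofNat (l[i].toNat + 1)] := by
          rw [hg, htake, List.set_append]
          simp [List.length_take, Nat.min_eq_left (le_of_lt hi)]
        simp only [next_chr_loop, hgetD, ne_eq, hz, not_false_eq_true, if_true, hset, hrev,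
          stripInc]
        simp

lemma toList_foldl_push (l : List Char) (s : String) :
    (l.foldl (fun s c => s.push c) s).toList = s.toList ++ l := by
  induction l generalizing s with
  | nil => simp
  | cons c rest ih => simp [List.foldl, ih]

lemma allz_iff (word : String) :
    (word == String.ofList (List.replicate word.toList.length 'z')) = true ↔
      word.toList.reverse.dropWhile (fun c => c == 'z') = [] := by
  rw [beq_iff_eq, List.dropWhile_eq_nil_iff]
  constructor
  · intro h x hx
    have hx' : x ∈ word.toList := List.mem_reverse.mp hx
    rw [h] at hx'
    simp only [String.toList_ofList] at hx'
    have := List.eq_of_mem_replicate hx'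
    simp [this]
  · intro h
    apply String.toList_inj.mp
    simp only [String.toList_ofList]
    apply List.eq_replicate_of_mem
    intro x hx
    have := h x (List.mem_reverse.mpr hx)
    simpa using this

-- A's result in the common form
lemma A_canon (word : String) :
    next_chr word = match stripInc word.toList.reverse with
      | [] => String.ofList [Char.ofNat ('z'.toNat + 1)]
      | r => String.ofList r.reverse := by
  unfold next_chr
  by_cases hall : word.toList.reverse.dropWhile (fun c => c == 'z') = []
  · rw [if_pos ((allz_iff word).mpr hall)]
    rw [stripInc_dropWhile, hall]
  · have hguard : (word == String.ofList (List.replicate word.toList.length 'z')) = false :=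
      Bool.eq_false_iff.mpr (fun h => hall ((allz_iff word).mp h))
    simp only [hguard, Bool.false_eq_true, if_false]
    obtain ⟨c, rest, hD⟩ := List.exists_cons_of_ne_nil hall
    have hloop := loop_eq_stripInc word.toList word.toList.length (le_refl _)
    rw [List.take_length] at hloop
    have hstrip : stripInc word.toList.reverse = Char.ofNat (c.toNat + 1) :: rest := by
      rw [stripInc_dropWhile, hD]
    rw [hstrip] at hloop ⊢
    apply String.toList_inj.mp
    rw [hloop, toList_foldl_push]
    simp

-- ---- B side ----
-- the forward fold computes the last non-'z' index (offset by the enumerate start)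
lemma fold_last (L : List Char) :
    ∀ (s acc : Int),
      (PySem.List.enumerate L s).foldl (fun acc p => if p.2 ≠ 'z' then p.1 else acc) acc
        = match stripInc L.reverse with
          | [] => acc
          | _ :: rest => s + rest.length := by
  induction L using List.reverseRecOn with
  | nil => intro s acc; simp [PySem.List.enumerate, stripInc]
  | append_singleton L₀ c ih =>
      intro s acc
      rw [PySem.List.enumerate_append, List.foldl_append]
      simp only [PySem.List.enumerate, List.foldl, List.reverse_append, List.reverse_cons]
      by_cases hz : c = 'z'
      · simp only [hz, ne_eq, not_true_eq_false, if_false]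
        exact ih s acc
      · simp [stripInc, hz]

-- decomposition of L by its last non-'z' character
lemma split_of_dropWhile (L : List Char) (c : Char) (R : List Char)
    (hD : L.reverse.dropWhile (fun c => c == 'z') = c :: R) :
    L = R.reverse ++ c :: (L.reverse.takeWhile (fun c => c == 'z')).reverse := by
  have h := (List.takeWhile_append_dropWhile (p := fun c => c == 'z') (l := L.reverse)).symm
  rw [hD] at h
  have h2 : L = (L.reverse.takeWhile (fun c => c == 'z') ++ c :: R).reverse := by
    rw [← h]; simp
  nth_rewrite 1 [h2]
  simp

lemma B_canon (word : String) :
    next_chr_alt word = match stripInc word.toList.reverse with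
      | [] => String.ofList [Char.ofNat ('z'.toNat + 1)]
      | r => String.ofList r.reverse := by
  unfold next_chr_alt
  rw [fold_last]
  by_cases hall : word.toList.reverse.dropWhile (fun c => c == 'z') = []
  · have h0 : stripInc word.toList.reverse = [] := by rw [stripInc_dropWhile, hall]
    rw [h0]
    norm_num
  · obtain ⟨c, R, hD⟩ := List.exists_cons_of_ne_nil hall
    have hstrip : stripInc word.toList.reverse = Char.ofNat (c.toNat + 1) :: R := by
      rw [stripInc_dropWhile, hD]
    rw [hstrip]
    have hneg : ¬ ((0 : Int) + (R.length : Int) < 0) := by omega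
    rw [if_neg hneg]
    have htn : ((0 : Int) + (R.length : Int)).toNat = R.length := by omega
    rw [htn]
    have hsplit := split_of_dropWhile word.toList c R hD
    have htake : word.toList.take R.length = R.reverse := by
      rw [hsplit]
      rw [List.take_append_of_le_length (by simp)]
      simp
    have hget : word.toList.getD R.length ' ' = c := by
      rw [hsplit, List.getD_eq_getElem _ _ (by simp)]
      rw [List.getElem_append_right (by simp)]
      simp
    rw [htake, hget]
    simp

-- ===== VERDICT (by name: the statement is the Claim_ definition above) =====
theorem next_chr_spec : Claim_equal_next_chr := by
  intro word _
  unfold Spec_next_chr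
  rw [A_canon, B_canon]
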